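-- pv_equiv track=rewrite | github.com/ngoduythinh250601/Codelearn | All/leftRigthCipher/leftRigthCipher.py | leftRigthCipher
-- ===== SOURCE A (Python) =====
-- def leftRigthCipher(s):
--     n = len(s)
--     ans = ""
--     while n > 0:
--         if n % 2 == 0:
--             ans += s[-1]
--             s = s[:-1]
--         else:
--             ans += s[0]
--             s = s[1:]
--         n -= 1
--     return ans[::-1]
-- ===== SOURCE B (Python) =====
-- def leftRigthCipher(s):
--     lo, hi = 0, len(s) - 1
--     parts = []
--     while lo <= hi:
--         if (hi - lo + 1) % 2 == 0:
--             parts.append(s[hi])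
--             hi -= 1
--         else:
--             parts.append(s[lo])
--             lo += 1
--     return ''.join(reversed(parts))
-- ===== Notes on version B (the rewrite author's own statement) =====
-- stated objective: faster
-- what changed: A repeatedly slices the string from either end (each step copies the remaining string); B keeps the string intact and walks two index pointers lo/hi chosen by the parity of the remaining length, collecting characters in a list joined once at the end.
import Mathlib
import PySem

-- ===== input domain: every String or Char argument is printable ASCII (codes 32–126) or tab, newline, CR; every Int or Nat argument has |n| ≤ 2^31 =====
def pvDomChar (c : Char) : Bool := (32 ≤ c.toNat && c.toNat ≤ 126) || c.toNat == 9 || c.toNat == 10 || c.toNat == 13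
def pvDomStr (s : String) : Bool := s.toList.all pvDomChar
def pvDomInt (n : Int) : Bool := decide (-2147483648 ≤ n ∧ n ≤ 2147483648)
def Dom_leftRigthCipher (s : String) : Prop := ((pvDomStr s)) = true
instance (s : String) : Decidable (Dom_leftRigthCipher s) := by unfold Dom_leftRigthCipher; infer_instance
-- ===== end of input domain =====

-- B replaces A's quadratic shrink-the-string-by-slicing loop by a two-pointer
-- index scan over the unchanged string (objective: faster, constant-factor in the port,
-- asymptotic in Python where slicing copies).

-- ===== PORT A =====
-- while n > 0: even n → take s[-1], s = s[:-1]; odd n → take s[0], s = s[1:]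
def pvLoopA : Nat → List Char → List Char → List Char
  | 0, _, ans => ans
  | n + 1, s, ans =>
    if (n + 1) % 2 == 0 then
      pvLoopA n (PySem.List.slice s none (some (-1))) (ans ++ [PySem.List.pyGetD s (-1) ' '])
    else
      pvLoopA n (PySem.List.slice s (some 1) none) (ans ++ [PySem.List.pyGetD s 0 ' '])

def leftRigthCipher (s : String) : String :=
  -- return ans[::-1]
  String.ofList ((PySem.List.slice? (pvLoopA s.toList.length s.toList []) none none (-1)).getD [])

-- ===== PORT B =====
-- while lo <= hi: even remaining length → take s[hi], hi -= 1; odd → take s[lo], lo += 1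
def pvLoopB (s : List Char) (lo hi : Int) (parts : List Char) : List Char :=
  if lo ≤ hi then
    if PySem.Int.mod (hi - lo + 1) 2 == 0 then
      pvLoopB s lo (hi - 1) (parts ++ [PySem.List.pyGetD s hi ' '])
    else
      pvLoopB s (lo + 1) hi (parts ++ [PySem.List.pyGetD s lo ' '])
  else parts
termination_by (hi + 1 - lo).toNat
decreasing_by all_goals omega

def leftRigthCipher_alt (s : String) : String :=
  -- return ''.join(reversed(parts))
  String.ofList (pvLoopB s.toList 0 ((s.toList.length : Int) - 1) []).reverse

-- ===== PRECONDITION & SPEC =====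
def Spec_leftRigthCipher (s : String) (out : String) : Prop := out = leftRigthCipher_alt s
instance (s : String) (out : String) : Decidable (Spec_leftRigthCipher s out) := by unfold Spec_leftRigthCipher; infer_instance

-- ===== CLAIM (what is proved, stated in full; the proofs are below) =====
def Claim_equal_leftRigthCipher : Prop := ∀ (s : String), Dom_leftRigthCipher s → Spec_leftRigthCipher s (leftRigthCipher s)

-- ===== LEMMAS AND PROOFS =====

-- the common sequence of picked characters (before the final reversal)
def picks : List Char → List Char
  | [] => []
  | x :: xs =>
    if (xs.length + 1) % 2 = 0 then
      (x :: xs).getLast (by simp) :: picks (x :: xs).dropLast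
    else
      x :: picks xs
termination_by l => l.length
decreasing_by all_goals (simp only [List.length_dropLast, List.length_cons]; omega)

lemma picks_even (l : List Char) (h : l ≠ []) (hp : l.length % 2 = 0) :
    picks l = l.getLast h :: picks l.dropLast := by
  cases l with
  | nil => exact absurd rfl h
  | cons x xs => simp only [picks, List.length_cons] at *; rw [if_pos hp]

lemma picks_odd (l : List Char) (h : l ≠ []) (hp : l.length % 2 = 1) :
    picks l = l.head h :: picks l.tail := by
  cases l with
  | nil => exact absurd rfl h
  | cons x xs =>
    simp only [picks, List.length_cons] at *
    rw [if_neg (by omega)]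
    rfl

lemma loopA_eq (n : Nat) : ∀ (l : List Char), l.length = n → ∀ acc,
    pvLoopA n l acc = acc ++ picks l := by
  induction n using Nat.strong_induction_on with
  | _ n ih =>
    intro l hl acc
    cases n with
    | zero =>
      have : l = [] := List.eq_nil_of_length_eq_zero hl
      simp [pvLoopA, this, picks]
    | succ m =>
      have hne : l ≠ [] := by intro h; simp [h] at hl
      by_cases hp : (m + 1) % 2 = 0
      · rw [pvLoopA, if_pos (by simp [hp]),
          PySem.List.slice_to_neg_one, PySem.List.pyGetD_neg_one l ' ' hne,
          ih m (by omega) l.dropLast (by simp [List.length_dropLast, hl]),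
          picks_even l hne (by rw [hl]; exact hp)]
        simp
      · rw [pvLoopA, if_neg (by simp [hp]),
          PySem.List.slice_from_one, PySem.List.pyGetD_zero,
          ih m (by omega) l.tail (by simp [hl]),
          picks_odd l hne (by rw [hl]; omega)]
        cases l with
        | nil => exact absurd rfl hne
        | cons x xs => simp
    
lemma loopB_eq (k : Nat) : ∀ (s : List Char) (lo hi : Int), 0 ≤ lo → hi < s.length →
    (hi + 1 - lo).toNat = k → ∀ parts,
    pvLoopB s lo hi parts = parts ++ picks ((s.drop lo.toNat).take k) := by
  induction k using Nat.strong_induction_on with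
  | _ k ih =>
    intro s lo hi hlo hhi hk parts
    by_cases hle : lo ≤ hi
    · have hk1 : 1 ≤ k := by omega
      set seg := (s.drop lo.toNat).take k with hseg
      have hlen : seg.length = k := by
        simp only [hseg, List.length_take, List.length_drop]
        omega
      have hne : seg ≠ [] := by
        intro h; rw [h] at hlen; simp at hlen; omega
      have hcast : hi - lo + 1 = (k : Int) := by omega
      have hcond : PySem.Int.mod ((k : Int)) 2 = ((k % 2 : Nat) : Int) := by
        exact_mod_cast PySem.Int.mod_natCast k 2
      by_cases hp : k % 2 = 0
      · have hget : PySem.List.pyGetD s hi ' ' = seg.getLast hne := by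
          rw [List.getLast_eq_getElem]
          simp only [hlen]
          simp only [hseg, List.getElem_take, List.getElem_drop]
          rw [PySem.List.pyGetD_eq_getElem s ' ' (by omega) (by exact_mod_cast hhi)]
          congr 1
          omega
        have hdrop : seg.dropLast = (s.drop lo.toNat).take (k - 1) := by
          rw [List.dropLast_eq_take, hlen, hseg, List.take_take]
          congr 1
          omega
        rw [pvLoopB, if_pos hle, if_pos (by rw [hcast, hcond, hp]; decide),
          ih (k-1) (by omega) s lo (hi-1) hlo (by omega) (by omega),
          picks_even seg hne (by rw [hlen]; exact hp), hget, hdrop]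
        simp
      · have hp1 : k % 2 = 1 := by omega
        have hget : PySem.List.pyGetD s lo ' ' = seg.head hne := by
          rw [List.head_eq_getElem]
          simp only [hseg, List.getElem_take, List.getElem_drop]
          rw [PySem.List.pyGetD_eq_getElem s ' ' hlo (by omega)]
          congr 1
        have htail : seg.tail = (s.drop (lo + 1).toNat).take (k - 1) := by
          rw [hseg, ← List.drop_one, List.drop_take, List.drop_drop,
            show lo.toNat + 1 = (lo + 1).toNat from by omega]
        rw [pvLoopB, if_pos hle, if_neg (by rw [hcast, hcond, hp1]; decide),
          ih (k-1) (by omega) s (lo+1) hi (by omega) hhi (by omega),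
          picks_odd seg hne (by rw [hlen]; omega), hget, htail]
        simp
    · have hk0 : k = 0 := by omega
      rw [pvLoopB, if_neg hle]
      simp [hk0, picks]

-- ===== VERDICT (by name: the statement is the Claim_ definition above) =====
theorem leftRigthCipher_spec : Claim_equal_leftRigthCipher := by
  intro s _
  unfold Spec_leftRigthCipher leftRigthCipher leftRigthCipher_alt
  rw [loopA_eq s.toList.length s.toList rfl [],
    loopB_eq s.toList.length s.toList 0 ((s.toList.length : Int) - 1)
      (by omega) (by omega) (by omega) []]
  rw [PySem.List.slice?_none_none_neg_one]
  simp only [Option.getD_some, List.nil_append, List.drop_zero, Int.toNat_zero,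
    List.take_length]
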